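-- pv_equiv track=rewrite | github.com/WillOnGit/bracket-maker | knockout.py | byeSequence
-- ===== SOURCE A (Python) =====
-- def byeSequence(rounds, byes):
--     if byes >= 2 ** rounds // 2:
--         raise RuntimeError('Too many byes for this number of rounds')
--
--     bye_placements = []
--     index = 1
--     for x in range(byes):
--         for y in range(rounds - 1):
--             if x % (2 ** y) == 0:
--                 index = index ^ (2 ** (rounds - y - 1))
--         bye_placements.append(index)
--
--     return sorted(bye_placements)
-- ===== SOURCE B (Python) =====
-- def byeSequence(rounds, byes):
--     if byes >= 2 ** rounds // 2:
--         raise RuntimeError('Too many byes for this number of rounds')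
--
--     placements = []
--     index = 1
--     top = rounds - 1
--     for x in range(byes):
--         # t = number of inner iterations of A that fire = min(v2(x)+1, top) (all of them for x == 0)
--         if x == 0:
--             t = top
--         else:
--             t = 1
--             xx = x
--             while xx % 2 == 0 and t < top:
--                 t += 1
--                 xx //= 2
--         if t > 0:
--             # XOR of the t distinct bits 2^(rounds-1), ..., 2^(rounds-t) is one contiguous mask
--             index ^= ((1 << t) - 1) << (rounds - t)
--         placements.append(index)
--     return sorted(placements)
-- ===== Notes on version B (the rewrite author's own statement) =====
-- stated objective: faster
-- what changed: A runs the full inner loop of rounds-1 modulus tests for every bye; B computes, per bye, only the trailing-zeros count t of x (capped at rounds-1) and XORs one contiguous bit mask ((1<<t)-1)<<(rounds-t), so the per-bye work drops from O(rounds) to O(v2(x)), amortised O(1).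
import Mathlib
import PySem

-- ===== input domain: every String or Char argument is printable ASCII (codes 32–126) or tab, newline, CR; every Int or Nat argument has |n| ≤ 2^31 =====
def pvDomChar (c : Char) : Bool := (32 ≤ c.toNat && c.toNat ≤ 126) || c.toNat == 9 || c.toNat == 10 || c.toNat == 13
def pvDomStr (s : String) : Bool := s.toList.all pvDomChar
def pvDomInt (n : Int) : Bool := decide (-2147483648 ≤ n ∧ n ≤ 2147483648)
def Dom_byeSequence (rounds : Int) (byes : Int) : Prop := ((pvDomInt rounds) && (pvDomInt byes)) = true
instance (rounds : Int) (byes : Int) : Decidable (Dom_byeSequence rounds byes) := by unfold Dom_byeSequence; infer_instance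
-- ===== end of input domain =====

-- B replaces A's per-bye scan of all rounds-1 inner iterations by a trailing-zeros count
-- and a single contiguous XOR mask per bye; return values agree on Pre_ (where A returns).

-- `2 ** rounds // 2` of the Python guard; for rounds < 0 Python compares with the float
-- `0.0` (`byes >= 0.0`), which comparing with the integer 0 reproduces exactly.
def byeThreshold (rounds : Int) : Int :=
  if rounds < 0 then 0 else PySem.Int.floordiv (2 ^ rounds.toNat) 2

-- ===== PORT A =====
-- the inner `for y in range(rounds - 1)` loop of A, acting on `index`
def innerA (rounds : Int) (x : Int) (index0 : Int) : Int :=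
  (PySem.List.pyRange 0 (rounds - 1) 1).foldl (fun index y =>
    if PySem.Int.mod x (2 ^ y.toNat) = 0 then
      PySem.Int.bxor index (2 ^ (rounds - y - 1).toNat)
    else index) index0

-- one iteration of A's `for x in range(byes)` loop; state = (index, bye_placements)
def stepA (rounds : Int) (st : Int × List Int) (x : Int) : Int × List Int :=
  let index := innerA rounds x st.1
  (index, st.2 ++ [index])

def byeSequence (rounds : Int) (byes : Int) : List Int :=
  if byes ≥ byeThreshold rounds then []   -- Python raises RuntimeError here (outside Pre_)
  else
    PySem.List.sorted ((PySem.List.pyRange 0 byes 1).foldl (stepA rounds) (1, [])).2 (fun v => v)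

-- ===== PORT B =====
-- Source B's `while xx % 2 == 0 and t < top:` loop; fuel := x.toNat bounds the iteration count
-- (the loop runs at most v2(x) ≤ x times); it only makes the recursion structurally total.
def tLoop (top : Int) : Nat → Int → Int → Int
  | 0, _, t => t
  | fuel + 1, xx, t =>
    if PySem.Int.mod xx 2 = 0 ∧ t < top then tLoop top fuel (PySem.Int.floordiv xx 2) (t + 1)
    else t

-- Source B's computation of t for one bye x
def tB (rounds : Int) (x : Int) : Int :=
  if x = 0 then rounds - 1 else tLoop (rounds - 1) x.toNat x 1

-- Source B's new index for one bye x: `index ^= ((1 << t) - 1) << (rounds - t)` when t > 0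
def idxB (rounds : Int) (x : Int) (index : Int) : Int :=
  if tB rounds x > 0 then
    PySem.Int.bxor index (((1 : Int) <<< (tB rounds x).toNat - 1) <<< (rounds - tB rounds x).toNat)
  else index

-- one iteration of Source B's `for x in range(byes)` loop; state = (index, placements)
def stepB (rounds : Int) (st : Int × List Int) (x : Int) : Int × List Int :=
  let index := idxB rounds x st.1
  (index, st.2 ++ [index])

def byeSequence_alt (rounds : Int) (byes : Int) : List Int :=
  if byes ≥ byeThreshold rounds then []   -- Python raises RuntimeError here (outside Pre_)
  else
    PySem.List.sorted ((PySem.List.pyRange 0 byes 1).foldl (stepB rounds) (1, [])).2 (fun v => v)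

-- ===== PRECONDITION & SPEC =====
-- Pre_ excludes exactly the inputs on which A raises RuntimeError ('Too many byes').
def Pre_byeSequence (rounds : Int) (byes : Int) : Prop := byes < byeThreshold rounds
instance (rounds : Int) (byes : Int) : Decidable (Pre_byeSequence rounds byes) := by
  unfold Pre_byeSequence; infer_instance

def pvWitness_byeSequence : Int × Int := (5, 7)

def Spec_byeSequence (rounds : Int) (byes : Int) (out : List Int) : Prop := out = byeSequence_alt rounds byes
instance (rounds : Int) (byes : Int) (out : List Int) : Decidable (Spec_byeSequence rounds byes out) := by unfold Spec_byeSequence; infer_instance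

-- ===== CLAIM (what is proved, stated in full; the proofs are below) =====
def Claim_equal_byeSequence : Prop := ∀ (rounds : Int) (byes : Int), Dom_byeSequence rounds byes → Pre_byeSequence rounds byes → Spec_byeSequence rounds byes (byeSequence rounds byes)

-- ===== LEMMAS AND PROOFS =====

-- the contiguous high mask: XOR of 2^(r-1), …, 2^(r-T)
def maskN (r T : Nat) : Nat := (2 ^ T - 1) <<< (r - T)

-- how many inner iterations of A fire for x = m, over y ∈ [0, n)
def TN (m n : Nat) : Nat := if m = 0 then n else min (padicValNat 2 m + 1) n

theorem TN_le (m n : Nat) : TN m n ≤ n := by unfold TN; split <;> omega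

-- key bit identity: adding the next lower bit extends the mask
theorem maskN_step (T e : Nat) :
    ((2 ^ T - 1) <<< (e + 1)) ^^^ 2 ^ e = (2 ^ (T + 1) - 1) <<< e := by
  apply Nat.eq_of_testBit_eq
  intro i
  simp only [Nat.testBit_xor, Nat.testBit_shiftLeft, Nat.testBit_two_pow,
    Nat.testBit_two_pow_sub_one]
  by_cases h1 : e + 1 ≤ i <;> by_cases h2 : e ≤ i <;> by_cases h3 : e = i <;>
    simp [h1, h2, h3] <;> omega

theorem v2_le_self {m : Nat} (hm : 0 < m) : padicValNat 2 m ≤ m := by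
  have h1 : 2 ^ padicValNat 2 m ∣ m := pow_padicValNat_dvd
  have h2 : 2 ^ padicValNat 2 m ≤ m := Nat.le_of_dvd hm h1
  have h3 : padicValNat 2 m < 2 ^ padicValNat 2 m := Nat.lt_two_pow_self
  omega

theorem tLoop_eq (top : Int) : ∀ (fuel : Nat) (m : Nat) (t : Int), 0 < m →
    padicValNat 2 m ≤ fuel → t ≤ top →
    tLoop top fuel (↑m) t = min (t + ↑(padicValNat 2 m)) top := by
  intro fuel
  induction fuel with
  | zero =>
    intro m t hm hf ht
    have hv : padicValNat 2 m = 0 := by omega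
    simp only [tLoop, hv]
    push_cast
    omega
  | succ fuel ih =>
    intro m t hm hf ht
    have hmod : PySem.Int.mod (↑m : Int) 2 = ↑(m % 2) := by
      exact_mod_cast PySem.Int.mod_natCast m 2
    by_cases he : m % 2 = 0
    · have hdvd : 2 ∣ m := Nat.dvd_of_mod_eq_zero he
      have hv : padicValNat 2 (m / 2) = padicValNat 2 m - 1 := padicValNat.div hdvd
      have hv1 : 1 ≤ padicValNat 2 m :=
        (padicValNat_dvd_iff_le (by omega)).mp (by simpa using hdvd)
      by_cases hlt : t < top
      · have hrw : tLoop top (fuel + 1) (↑m) t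
            = tLoop top fuel (PySem.Int.floordiv (↑m) 2) (t + 1) := by
          simp only [tLoop]
          rw [if_pos ⟨by rw [hmod, he]; norm_num, hlt⟩]
        rw [hrw]
        have hfd : PySem.Int.floordiv (↑m : Int) 2 = ↑(m / 2) := by
          exact_mod_cast PySem.Int.floordiv_natCast m 2
        rw [hfd, ih (m / 2) (t + 1) (by omega) (by omega) (by omega)]
        omega
      · have hrw : tLoop top (fuel + 1) (↑m) t = t := by
          simp only [tLoop]
          rw [if_neg (by rintro ⟨-, h⟩; exact hlt h)]
        rw [hrw]
        omega
    · have hv : padicValNat 2 m = 0 := padicValNat.eq_zero_of_not_dvd (by omega)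
      have hrw : tLoop top (fuel + 1) (↑m) t = t := by
        simp only [tLoop]
        rw [if_neg (by
          rintro ⟨h2, -⟩
          rw [hmod] at h2
          have : m % 2 = 0 := by exact_mod_cast h2
          omega)]
      rw [hrw, hv]
      push_cast
      omega

-- A's inner loop over y ∈ [0, n), started at a nonnegative index, XORs in maskN r (TN m n)
theorem inner_eq (r m : Nat) : ∀ (n : Nat) (j : Nat), n < r →
    (PySem.List.pyRange 0 (n : Int) 1).foldl (fun index y =>
        if PySem.Int.mod (↑m) (2 ^ y.toNat) = 0 then
          PySem.Int.bxor index (2 ^ ((r : Int) - y - 1).toNat)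
        else index) (↑j)
      = ↑(j ^^^ maskN r (TN m n)) := by
  intro n
  induction n with
  | zero =>
    intro j _
    rw [PySem.List.pyRange_one_eq_nil (by norm_num)]
    simp [maskN, TN]
  | succ n ih =>
    intro j hr
    have hcast : ((n + 1 : Nat) : Int) = (n : Int) + 1 := by push_cast; ring
    rw [hcast, PySem.List.pyRange_one_succ_right (by positivity), List.foldl_append, ih j (by omega)]
    simp only [List.foldl_cons, List.foldl_nil]
    have htn : ((n : Int)).toNat = n := Int.toNat_natCast n
    have hexp : ((r : Int) - ↑n - 1).toNat = r - n - 1 := by omega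
    have hpow : ((2 : Int) ^ n) = ((2 ^ n : Nat) : Int) := by push_cast; ring
    rw [htn, hexp, hpow]
    have hpow2 : ((2 : Int) ^ (r - n - 1)) = ((2 ^ (r - n - 1) : Nat) : Int) := by push_cast; ring
    rw [hpow2, PySem.Int.mod_natCast]
    by_cases hfire : m % 2 ^ n = 0
    · have hdvd : 2 ^ n ∣ m := Nat.dvd_of_mod_eq_zero hfire
      have hTn : TN m n = n := by
        unfold TN
        by_cases hm : m = 0
        · simp [hm]
        · have hle : n ≤ padicValNat 2 m := (padicValNat_dvd_iff_le hm).mp hdvd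
          simp [hm]; omega
      have hTn1 : TN m (n + 1) = n + 1 := by
        unfold TN
        by_cases hm : m = 0
        · simp [hm]
        · have hle : n ≤ padicValNat 2 m := (padicValNat_dvd_iff_le hm).mp hdvd
          simp [hm]; omega
      have hmask : maskN r (TN m n) ^^^ 2 ^ (r - n - 1) = maskN r (TN m (n + 1)) := by
        rw [hTn, hTn1]
        unfold maskN
        have h1 : r - n = (r - n - 1) + 1 := by omega
        rw [h1]
        have h2 : r - (n + 1) = r - n - 1 := by omega
        rw [h2]
        exact maskN_step n (r - n - 1)
      rw [if_pos (by exact_mod_cast congrArg (Nat.cast (R := Int)) hfire),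
        PySem.Int.bxor_natCast, Nat.xor_assoc, hmask]
    · have hm : m ≠ 0 := by rintro rfl; simp [Nat.zero_mod] at hfire
      have hndvd : ¬ 2 ^ n ∣ m := fun h => hfire (Nat.eq_zero_of_dvd_of_lt h |> fun _ => by
        exact (Nat.mod_eq_zero_of_dvd h))
      have hvlt : padicValNat 2 m < n := by
        by_contra hc
        exact hndvd ((padicValNat_dvd_iff_le hm).mpr (by omega))
      have hTeq : TN m (n + 1) = TN m n := by
        unfold TN; simp [hm]; omega
      rw [if_neg (by
        intro h
        apply hfire
        exact_mod_cast h), hTeq]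

theorem maskCast (T s : Nat) :
    ((1 : Int) <<< T - 1) <<< s = ↑((2 ^ T - 1) <<< s) := by
  rw [Int.shiftLeft_eq, Int.shiftLeft_eq, Nat.shiftLeft_eq, one_mul,
    Nat.cast_mul, Nat.cast_sub Nat.one_le_two_pow]
  push_cast
  ring

theorem byeThreshold_pos_eq (rounds : Int) (h : 1 ≤ rounds) :
    byeThreshold rounds = ((2 ^ (rounds.toNat - 1) : Nat) : Int) := by
  unfold byeThreshold
  rw [if_neg (by omega)]
  rw [PySem.Int.floordiv_eq_ediv_of_pos (by norm_num)]
  have hr : rounds.toNat = (rounds.toNat - 1) + 1 := by omega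
  rw [hr, pow_succ]
  push_cast
  rw [Int.mul_ediv_cancel _ (by norm_num)]

theorem innerA_eq (r : Nat) (hr : 1 ≤ r) (m j : Nat) :
    innerA (↑r) (↑m) (↑j) = ↑(j ^^^ maskN r (TN m (r - 1))) := by
  unfold innerA
  have h := inner_eq r m (r - 1) j (by omega)
  rw [show (((r - 1 : Nat) : Int)) = (↑r : Int) - 1 by omega] at h
  exact h

theorem idxB_eq (r m : Nat) (hcase : (m = 0 ∧ 1 ≤ r) ∨ (1 ≤ m ∧ 3 ≤ r)) (j : Nat) :
    idxB (↑r) (↑m) (↑j) = ↑(j ^^^ maskN r (TN m (r - 1))) := by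
  have hT : tB (↑r) (↑m) = ↑(TN m (r - 1)) := by
    unfold tB
    rcases hcase with ⟨rfl, hr⟩ | ⟨hm, hr⟩
    · rw [if_pos (by norm_num)]
      unfold TN
      rw [if_pos rfl]
      omega
    · rw [if_neg (by exact_mod_cast (by omega : m ≠ 0)), Int.toNat_natCast]
      rw [tLoop_eq (↑r - 1) m m 1 (by omega) (v2_le_self (by omega)) (by omega)]
      unfold TN
      rw [if_neg (by omega)]
      have hmin := Nat.cast_min (α := Int) (padicValNat 2 m + 1) (r - 1)
      push_cast at hmin
      omega
  unfold idxB
  rw [hT]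
  by_cases hTpos : 1 ≤ TN m (r - 1)
  · have hTr : TN m (r - 1) ≤ r - 1 := TN_le m (r - 1)
    have hr1 : 1 ≤ r := by rcases hcase with ⟨-, h⟩ | ⟨-, h⟩ <;> omega
    rw [if_pos (by exact_mod_cast (by omega : (0:Int) < ↑(TN m (r - 1)))), Int.toNat_natCast,
      show ((↑r : Int) - ↑(TN m (r - 1))).toNat = r - TN m (r - 1) by omega,
      maskCast, PySem.Int.bxor_natCast]
    rfl
  · have hT0 : TN m (r - 1) = 0 := by omega
    rw [hT0]
    rw [if_neg (by norm_num)]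
    simp [maskN]

theorem stepA_eval (rounds : Int) (j : Int) (out : List Int) (x : Int) :
    stepA rounds (j, out) x = (innerA rounds x j, out ++ [innerA rounds x j]) := rfl

theorem stepB_eval (rounds : Int) (j : Int) (out : List Int) (x : Int) :
    stepB rounds (j, out) x = (idxB rounds x j, out ++ [idxB rounds x j]) := rfl

-- the whole bye loop, as a fold with a nonnegative running index
theorem outer_eq (rounds byes : Int) (h1 : 1 ≤ rounds) (hb : byes < byeThreshold rounds) :
    ∀ (k : Nat) (a : Int), 0 ≤ a → (byes - a).toNat = k → ∀ (j : Nat) (out : List Int),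
    (PySem.List.pyRange a byes 1).foldl (stepA rounds) (↑j, out)
      = (PySem.List.pyRange a byes 1).foldl (stepB rounds) (↑j, out) := by
  obtain ⟨r, rfl⟩ : ∃ r : Nat, rounds = ↑r := ⟨rounds.toNat, by omega⟩
  have hr1 : 1 ≤ r := by exact_mod_cast h1
  rw [byeThreshold_pos_eq _ h1] at hb
  simp only [Int.toNat_natCast] at hb
  intro k
  induction k with
  | zero =>
    intro a ha hk j out
    have hnil : PySem.List.pyRange a byes 1 = [] := PySem.List.pyRange_one_eq_nil (by omega)
    rw [hnil]
    rfl
  | succ k ih =>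
    intro a ha hk j out
    obtain ⟨m, rfl⟩ : ∃ m : Nat, a = ↑m := ⟨a.toNat, by omega⟩
    have hab : (↑m : Int) < byes := by omega
    have hcase : (m = 0 ∧ 1 ≤ r) ∨ (1 ≤ m ∧ 3 ≤ r) := by
      by_cases hm0 : m = 0
      · exact Or.inl ⟨hm0, hr1⟩
      · refine Or.inr ⟨by omega, ?_⟩
        have hm1 : (1 : Int) ≤ ↑m := by exact_mod_cast (by omega : 1 ≤ m)
        have h2 : (2 : Int) < ((2 ^ (r - 1) : Nat) : Int) := by omega
        have h2' : 2 < 2 ^ (r - 1) := by exact_mod_cast h2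
        by_contra hc
        have hle : r - 1 ≤ 1 := by omega
        have := Nat.pow_le_pow_right (by norm_num : 1 ≤ 2) hle
        omega
    have hcons : PySem.List.pyRange (↑m) byes 1 = ↑m :: PySem.List.pyRange (↑m + 1) byes 1 :=
      PySem.List.pyRange_one_cons (by omega)
    rw [hcons, List.foldl_cons, List.foldl_cons, stepA_eval, stepB_eval,
      innerA_eq r hr1 m j, idxB_eq r m hcase j]
    exact ih (↑m + 1) (by omega) (by omega) (j ^^^ maskN r (TN m (r - 1)))
      (out ++ [((j ^^^ maskN r (TN m (r - 1)) : Nat) : Int)])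

-- ===== VERDICT (by name: the statement is the Claim_ definition above) =====
theorem byeSequence_spec : Claim_equal_byeSequence := by
  intro rounds byes _ hpre
  unfold Spec_byeSequence byeSequence byeSequence_alt
  unfold Pre_byeSequence at hpre
  rw [if_neg (by omega), if_neg (by omega)]
  by_cases h1 : 1 ≤ rounds
  · have h := outer_eq rounds byes h1 hpre (byes - 0).toNat 0 le_rfl rfl 1 []
    rw [show ((1 : Int), ([] : List Int)) = (((1 : Nat) : Int), ([] : List Int)) by norm_num, h]
  · have hempty : PySem.List.pyRange 0 byes 1 = [] :=
      PySem.List.pyRange_one_eq_nil (by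
        unfold byeThreshold at hpre
        split at hpre
        · omega
        · have hr0 : rounds.toNat = 0 := by omega
          rw [hr0] at hpre
          simp [PySem.Int.floordiv] at hpre
          omega)
    rw [hempty]
    rfl
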